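-- pv_equiv track=rewrite | github.com/cbenson85/GEM_Trading_System | hybrid_model_backtester.py | map_sic_to_sector
-- ===== SOURCE A (Python) =====
-- def map_sic_to_sector(sic_description: str) -> str:
--     if not sic_description: return "UNKNOWN"
--     sic = sic_description.lower()
--     if any(kw in sic for kw in ['pharmaceutical', 'biological', 'medical lab', 'health', 'surgical']): return "BIOTECH/HEALTH"
--     if any(kw in sic for kw in ['software', 'electronic', 'computer', 'semiconductor', 'communications']): return "TECH"
--     if any(kw in sic for kw in ['oil & gas', 'mining', 'coal', 'petroleum', 'ores']): return "ENERGY/MINING"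
--     if 'blank checks' in sic: return "SPAC"
--     if any(kw in sic for kw in ['bank', 'finance', 'investment']): return "FINANCE"
--     if 'retail' in sic: return "RETAIL"
--     return "OTHER"
-- ===== SOURCE B (Python) =====
-- # Different algorithm: one left-to-right sweep over string positions; at each
-- # position check which keywords start there and keep the minimum priority seen.
-- _SECTORS = ["BIOTECH/HEALTH", "TECH", "ENERGY/MINING", "SPAC", "FINANCE", "RETAIL", "OTHER"]
-- _KEYWORDS = {
--     "pharmaceutical": 0, "biological": 0, "medical lab": 0, "health": 0, "surgical": 0,
--     "software": 1, "electronic": 1, "computer": 1, "semiconductor": 1, "communications": 1,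
--     "oil & gas": 2, "mining": 2, "coal": 2, "petroleum": 2, "ores": 2,
--     "blank checks": 3,
--     "bank": 4, "finance": 4, "investment": 4,
--     "retail": 5,
-- }
--
-- def map_sic_to_sector(sic_description: str) -> str:
--     if not sic_description:
--         return "UNKNOWN"
--     sic = sic_description.lower()
--     best = 6
--     for i in range(len(sic)):
--         for kw, pri in _KEYWORDS.items():
--             if pri < best and sic.startswith(kw, i):
--                 best = pri
--     return _SECTORS[best]
-- ===== Notes on version B (the rewrite author's own statement) =====
-- stated objective: alternative
-- what changed: Instead of six priority-ordered substring-membership branches with early returns, B makes a single left-to-right sweep over the string's positions, testing at each position which keywords start there and folding the minimum keyword priority into an accumulator, then indexes a sector table with that minimum.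
import Mathlib
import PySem

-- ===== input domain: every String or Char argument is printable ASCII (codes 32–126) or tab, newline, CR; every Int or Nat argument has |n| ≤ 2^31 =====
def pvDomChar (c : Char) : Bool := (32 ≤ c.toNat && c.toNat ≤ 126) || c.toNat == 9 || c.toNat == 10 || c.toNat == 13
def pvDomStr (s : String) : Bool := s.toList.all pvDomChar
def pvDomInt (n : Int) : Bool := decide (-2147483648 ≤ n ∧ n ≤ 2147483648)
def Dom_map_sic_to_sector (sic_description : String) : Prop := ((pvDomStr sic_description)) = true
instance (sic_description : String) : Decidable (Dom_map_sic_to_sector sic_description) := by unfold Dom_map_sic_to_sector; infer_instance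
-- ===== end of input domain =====

-- B replaces A's six-way early-return branch chain by a single sweep over string positions that folds the minimum matched keyword priority into an accumulator, then indexes a sector table (alternative algorithm, same cost).


-- ===== PORT A =====
def map_sic_to_sector (sic_description : String) : String :=
  if sic_description == "" then "UNKNOWN"
  else
    let sic := PySem.Str.lower sic_description
    if (["pharmaceutical", "biological", "medical lab", "health", "surgical"] : List String).any (fun kw => PySem.Str.isIn kw sic) then "BIOTECH/HEALTH"
    else if (["software", "electronic", "computer", "semiconductor", "communications"] : List String).any (fun kw => PySem.Str.isIn kw sic) then "TECH"
    else if (["oil & gas", "mining", "coal", "petroleum", "ores"] : List String).any (fun kw => PySem.Str.isIn kw sic) then "ENERGY/MINING"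
    else if PySem.Str.isIn "blank checks" sic then "SPAC"
    else if (["bank", "finance", "investment"] : List String).any (fun kw => PySem.Str.isIn kw sic) then "FINANCE"
    else if PySem.Str.isIn "retail" sic then "RETAIL"
    else "OTHER"

-- ===== PORT B =====
-- B: keyword → priority table and sector table; one sweep over positions keeping the minimum priority.
def pvSectors : List String :=
  ["BIOTECH/HEALTH", "TECH", "ENERGY/MINING", "SPAC", "FINANCE", "RETAIL", "OTHER"]

def pvKeywords : List (String × Nat) :=
  [("pharmaceutical", 0), ("biological", 0), ("medical lab", 0), ("health", 0), ("surgical", 0),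
   ("software", 1), ("electronic", 1), ("computer", 1), ("semiconductor", 1), ("communications", 1),
   ("oil & gas", 2), ("mining", 2), ("coal", 2), ("petroleum", 2), ("ores", 2),
   ("blank checks", 3),
   ("bank", 4), ("finance", 4), ("investment", 4),
   ("retail", 5)]

def map_sic_to_sector_alt (sic_description : String) : String :=
  if sic_description == "" then "UNKNOWN"
  else
    let sic := PySem.Str.lower sic_description
    let cs := sic.toList
    -- for i in range(len(sic)): for kw, pri in _KEYWORDS.items(): if pri < best and sic.startswith(kw, i): best = pri
    -- sic.startswith(kw, i) with 0 ≤ i is exactly: kw is a prefix of sic[i:]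
    let best := (List.range cs.length).foldl
      (fun b i => pvKeywords.foldl
        (fun b kp => if kp.2 < b && PySem.Chars.startswith (cs.drop i) kp.1.toList then kp.2 else b) b) 6
    -- _SECTORS[best]: best ≤ 6 always, so the Python index never raises; getD is exact here
    pvSectors.getD best "OTHER"

-- ===== PRECONDITION & SPEC =====
def Spec_map_sic_to_sector (sic_description : String) (out : String) : Prop := out = map_sic_to_sector_alt sic_description
instance (sic_description : String) (out : String) : Decidable (Spec_map_sic_to_sector sic_description out) := by unfold Spec_map_sic_to_sector; infer_instance

-- ===== CLAIM (what is proved, stated in full; the proofs are below) =====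
def Claim_equal_map_sic_to_sector : Prop := ∀ (sic_description : String), Dom_map_sic_to_sector sic_description → Spec_map_sic_to_sector sic_description (map_sic_to_sector sic_description)

-- ===== LEMMAS AND PROOFS =====

-- proof-only helpers
def pvPairs (n : Nat) : List (Nat × (String × Nat)) :=
  (List.range n).flatMap (fun i => pvKeywords.map (fun kp => (i, kp)))

def pvTest (cs : List Char) (x : Nat × (String × Nat)) : Bool :=
  PySem.Chars.startswith (cs.drop x.1) x.2.1.toList

-- "some keyword of priority q occurs in cs"
def pvMatch (cs : List Char) (q : Nat) : Prop :=
  ∃ kp ∈ pvKeywords, kp.2 = q ∧ PySem.Chars.isIn kp.1.toList cs = true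

-- characterization of the min-priority fold
theorem pvMinFold_char {α : Type} (c : α → Bool) (p : α → Nat) (L : List α) :
    ∀ (b : Nat),
      L.foldl (fun b x => if p x < b && c x then p x else b) b ≤ b ∧
      (L.foldl (fun b x => if p x < b && c x then p x else b) b = b ∨
        ∃ x ∈ L, c x = true ∧ p x = L.foldl (fun b x => if p x < b && c x then p x else b) b) ∧
      (∀ x ∈ L, c x = true → L.foldl (fun b x => if p x < b && c x then p x else b) b ≤ p x) := by
  induction L with
  | nil => simp
  | cons a L ih =>
    intro b
    simp only [List.foldl_cons]
    obtain ⟨h1, h2, h3⟩ := ih (if p a < b && c a then p a else b)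
    by_cases hc : (decide (p a < b) && c a) = true
    · obtain ⟨hlt, hca⟩ := Bool.and_eq_true_iff.1 hc
      simp only [hc, if_true] at h1 h2 h3 ⊢
      refine ⟨le_trans h1 (le_of_lt (by exact_mod_cast of_decide_eq_true hlt)), ?_, ?_⟩
      · rcases h2 with h2 | ⟨x, hx, hcx, hpx⟩
        · exact Or.inr ⟨a, List.mem_cons_self, hca, h2.symm⟩
        · exact Or.inr ⟨x, List.mem_cons_of_mem _ hx, hcx, hpx⟩
      · intro x hx hcx
        rcases List.mem_cons.1 hx with rfl | hx
        · exact h1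
        · exact h3 x hx hcx
    · rw [Bool.not_eq_true] at hc
      simp only [hc, Bool.false_eq_true, if_false] at h1 h2 h3 ⊢
      refine ⟨h1, ?_, ?_⟩
      · rcases h2 with h2 | ⟨x, hx, hcx, hpx⟩
        · exact Or.inl h2
        · exact Or.inr ⟨x, List.mem_cons_of_mem _ hx, hcx, hpx⟩
      · intro x hx hcx
        rcases List.mem_cons.1 hx with rfl | hx
        · have : ¬ p x < b := by
            intro h
            simp [h, hcx] at hc
          omega
        · exact h3 x hx hcx

theorem pvNested_eq_flat (cs : List Char) :
    (List.range cs.length).foldl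
      (fun b i => pvKeywords.foldl
        (fun b kp => if kp.2 < b && PySem.Chars.startswith (cs.drop i) kp.1.toList then kp.2 else b) b) 6
    = (pvPairs cs.length).foldl
        (fun b x => if x.2.2 < b && pvTest cs x then x.2.2 else b) 6 := by
  rw [pvPairs, List.foldl_flatMap]
  simp [List.foldl_map, pvTest]

theorem pvKeywords_ne : ∀ kp ∈ pvKeywords, kp.1.toList ≠ [] := by decide

theorem pvKeywords_pri : ∀ kp ∈ pvKeywords, kp.2 ≤ 5 := by decide

theorem pvExists_pairs_iff (cs : List Char) (q : Nat) :
    (∃ x ∈ pvPairs cs.length, pvTest cs x = true ∧ x.2.2 = q) ↔ pvMatch cs q := by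
  constructor
  · rintro ⟨x, hmem, ht, hq⟩
    simp only [pvPairs, List.mem_flatMap, List.mem_map, List.mem_range] at hmem
    obtain ⟨i, hi, kp, hkp, rfl⟩ := hmem
    refine ⟨kp, hkp, hq, ?_⟩
    rw [← PySem.Chars.exists_prefix_drop_iff_isIn]
    exact ⟨i, (PySem.Chars.startswith_iff _ _).1 ht⟩
  · rintro ⟨kp, hkp, hq, hin⟩
    obtain ⟨j, hj⟩ := (PySem.Chars.exists_prefix_drop_iff_isIn kp.1.toList cs).2 hin
    have hlt : j < cs.length := by
      by_contra hge
      rw [List.drop_eq_nil_of_le (Nat.le_of_not_lt hge)] at hj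
      exact pvKeywords_ne kp hkp (List.prefix_nil.1 hj)
    refine ⟨(j, kp), ?_, (PySem.Chars.startswith_iff _ _).2 hj, hq⟩
    simp only [pvPairs, List.mem_flatMap, List.mem_map, List.mem_range]
    exact ⟨j, hlt, kp, hkp, rfl⟩

-- A's branch conditions expressed as pvMatch
theorem pvBranch0 (sic : String) :
    ((["pharmaceutical", "biological", "medical lab", "health", "surgical"] : List String).any (fun kw => PySem.Str.isIn kw sic) = true) ↔ pvMatch sic.toList 0 := by
  simp [pvMatch, pvKeywords]

theorem pvBranch1 (sic : String) :
    ((["software", "electronic", "computer", "semiconductor", "communications"] : List String).any (fun kw => PySem.Str.isIn kw sic) = true) ↔ pvMatch sic.toList 1 := by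
  simp [pvMatch, pvKeywords]

theorem pvBranch2 (sic : String) :
    ((["oil & gas", "mining", "coal", "petroleum", "ores"] : List String).any (fun kw => PySem.Str.isIn kw sic) = true) ↔ pvMatch sic.toList 2 := by
  simp [pvMatch, pvKeywords]

theorem pvBranch3 (sic : String) :
    (PySem.Str.isIn "blank checks" sic = true) ↔ pvMatch sic.toList 3 := by
  simp [pvMatch, pvKeywords]

theorem pvBranch4 (sic : String) :
    ((["bank", "finance", "investment"] : List String).any (fun kw => PySem.Str.isIn kw sic) = true) ↔ pvMatch sic.toList 4 := by
  simp [pvMatch, pvKeywords]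

theorem pvBranch5 (sic : String) :
    (PySem.Str.isIn "retail" sic = true) ↔ pvMatch sic.toList 5 := by
  simp [pvMatch, pvKeywords]

-- ===== VERDICT (by name: the statement is the Claim_ definition above) =====
theorem map_sic_to_sector_spec : Claim_equal_map_sic_to_sector := by
  intro s _
  unfold Spec_map_sic_to_sector map_sic_to_sector map_sic_to_sector_alt
  by_cases hs : s == ""
  · simp [hs]
  · simp only [hs]
    set sic := PySem.Str.lower s with hsic
    set cs := sic.toList with hcs
    rw [pvNested_eq_flat]
    obtain ⟨hle, hor, hmin⟩ :=
      pvMinFold_char (pvTest cs) (fun x => x.2.2) (pvPairs cs.length) 6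
    set r := (pvPairs cs.length).foldl
        (fun b x => if x.2.2 < b && pvTest cs x then x.2.2 else b) 6 with hr
    have hor' : r = 6 ∨ pvMatch cs r := by
      rcases hor with h | ⟨x, hx, hcx, hpx⟩
      · exact Or.inl h
      · exact Or.inr ((pvExists_pairs_iff cs r).1 ⟨x, hx, hcx, hpx⟩)
    have hmin' : ∀ q, pvMatch cs q → r ≤ q := by
      intro q hq
      obtain ⟨x, hx, hcx, hpx⟩ := (pvExists_pairs_iff cs q).2 hq
      exact hpx ▸ hmin x hx hcx
    clear hor hmin hr
    by_cases m0 : pvMatch cs 0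
    · rw [if_pos ((pvBranch0 sic).2 m0)]
      have : r = 0 := Nat.le_zero.1 (hmin' 0 m0)
      rw [this]; rfl
    · rw [if_neg (fun h => m0 ((pvBranch0 sic).1 h))]
      by_cases m1 : pvMatch cs 1
      · rw [if_pos ((pvBranch1 sic).2 m1)]
        have h1 : r ≤ 1 := hmin' 1 m1
        have : r = 1 := by
          rcases hor' with h | h
          · omega
          · interval_cases r
            · exact absurd h m0
            · rfl
        rw [this]; rfl
      · rw [if_neg (fun h => m1 ((pvBranch1 sic).1 h))]
        by_cases m2 : pvMatch cs 2
        · rw [if_pos ((pvBranch2 sic).2 m2)]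
          have h2 : r ≤ 2 := hmin' 2 m2
          have : r = 2 := by
            rcases hor' with h | h
            · omega
            · interval_cases r
              · exact absurd h m0
              · exact absurd h m1
              · rfl
          rw [this]; rfl
        · rw [if_neg (fun h => m2 ((pvBranch2 sic).1 h))]
          by_cases m3 : pvMatch cs 3
          · rw [if_pos ((pvBranch3 sic).2 m3)]
            have h3 : r ≤ 3 := hmin' 3 m3
            have : r = 3 := by
              rcases hor' with h | h
              · omega
              · interval_cases r
                · exact absurd h m0
                · exact absurd h m1
                · exact absurd h m2
                · rfl
            rw [this]; rfl
          · rw [if_neg (fun h => m3 ((pvBranch3 sic).1 h))]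
            by_cases m4 : pvMatch cs 4
            · rw [if_pos ((pvBranch4 sic).2 m4)]
              have h4 : r ≤ 4 := hmin' 4 m4
              have : r = 4 := by
                rcases hor' with h | h
                · omega
                · interval_cases r
                  · exact absurd h m0
                  · exact absurd h m1
                  · exact absurd h m2
                  · exact absurd h m3
                  · rfl
              rw [this]; rfl
            · rw [if_neg (fun h => m4 ((pvBranch4 sic).1 h))]
              by_cases m5 : pvMatch cs 5
              · rw [if_pos ((pvBranch5 sic).2 m5)]
                have h5 : r ≤ 5 := hmin' 5 m5
                have : r = 5 := by
                  rcases hor' with h | h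
                  · omega
                  · interval_cases r
                    · exact absurd h m0
                    · exact absurd h m1
                    · exact absurd h m2
                    · exact absurd h m3
                    · exact absurd h m4
                    · rfl
                rw [this]; rfl
              · rw [if_neg (fun h => m5 ((pvBranch5 sic).1 h))]
                have : r = 6 := by
                  rcases hor' with h | h
                  · exact h
                  · have : r ≤ 5 := by
                      obtain ⟨kp, hkp, hq, _⟩ := h
                      exact hq ▸ pvKeywords_pri kp hkp
                    interval_cases r
                    · exact absurd h m0
                    · exact absurd h m1
                    · exact absurd h m2
                    · exact absurd h m3
                    · exact absurd h m4
                    · exact absurd h m5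
                rw [this]; rfl
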